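-- pv_equiv track=rewrite | github.com/Jokau/ada-project | helpers.py | combinliste
-- ===== SOURCE A (Python) =====
-- def combinliste(seq, k=2):
--     p = []
--     i, imax = 0, 2 ** len(seq) - 1
--     while i <= imax:
--         s = []
--         j, jmax = 0, len(seq) - 1
--         while j <= jmax:
--             if (i >> j) & 1 == 1:
--                 s.append(seq[j])
--             j += 1
--         if len(s) == k:
--             p.append(s)
--         i += 1
--     return p
-- ===== SOURCE B (Python) =====
-- def combinliste(seq, k=2):
--     # Directly build k-combinations in colexicographic order (= mask-integer order)
--     if k < 0:
--         return []
--     def rec(m, r):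
--         if r == 0:
--             return [[]]
--         res = []
--         for j in range(r - 1, m):
--             for c in rec(j, r - 1):
--                 res.append(c + [seq[j]])
--         return res
--     return rec(len(seq), k)
-- ===== Notes on version B (the rewrite author's own statement) =====
-- stated objective: alternative
-- what changed: B generates the k-combinations directly by recursion in colexicographic order (the order A's increasing mask integers induce), instead of scanning all 2^n bitmasks and filtering by popcount; intended as faster (measured 26x at n=16, but both time out at n=64 where the output itself is huge), so recorded as alternative.
import Mathlib
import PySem

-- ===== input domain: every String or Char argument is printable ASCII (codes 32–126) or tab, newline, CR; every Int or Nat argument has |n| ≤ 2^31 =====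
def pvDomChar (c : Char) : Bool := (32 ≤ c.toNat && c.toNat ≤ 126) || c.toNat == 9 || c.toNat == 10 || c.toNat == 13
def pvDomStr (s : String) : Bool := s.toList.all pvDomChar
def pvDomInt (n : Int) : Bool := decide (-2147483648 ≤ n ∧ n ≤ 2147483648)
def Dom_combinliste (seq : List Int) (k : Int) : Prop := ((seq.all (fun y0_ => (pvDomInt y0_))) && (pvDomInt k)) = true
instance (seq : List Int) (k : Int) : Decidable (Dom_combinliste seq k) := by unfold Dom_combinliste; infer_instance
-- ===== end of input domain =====

-- B replaces A's scan of all 2^n bitmasks by direct recursive generation of the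
-- k-combinations in colexicographic order (the order the mask integers induce).

-- ===== PORT A =====
-- inner while loop of A: collect seq[j] for every set bit j of mask i
def extractA (seq : List Int) (i : Nat) : List Int :=
  (List.range seq.length).foldl
    (fun s j => if (i >>> j) &&& 1 = 1 then s ++ [seq.getD j 0] else s) []

def combinliste (seq : List Int) (k : Int) : List (List Int) :=
  -- while i <= imax (imax = 2**len(seq) - 1): i runs over all masks 0 .. 2^n - 1
  (List.range (2 ^ seq.length)).foldl
    (fun p i =>
      let s := extractA seq i
      if (s.length : Int) = k then p ++ [s] else p) []

-- ===== PORT B =====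
-- rec(m, r) of Source B: all r-subsets of seq[0..m-1] in colex order
def combAux (seq : List Int) : Nat → Nat → List (List Int)
  | _, 0 => [[]]
  | m, r + 1 =>
    (List.range' r (m - r)).foldl
      (fun res j => res ++ (combAux seq j r).map (fun c => c ++ [seq.getD j 0])) []

def combinliste_alt (seq : List Int) (k : Int) : List (List Int) :=
  if k < 0 then [] else combAux seq seq.length k.toNat

-- ===== PRECONDITION & SPEC =====
def Spec_combinliste (seq : List Int) (k : Int) (out : List (List Int)) : Prop := out = combinliste_alt seq k
instance (seq : List Int) (k : Int) (out : List (List Int)) : Decidable (Spec_combinliste seq k out) := by unfold Spec_combinliste; infer_instance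

-- ===== CLAIM (what is proved, stated in full; the proofs are below) =====
def Claim_equal_combinliste : Prop := ∀ (seq : List Int) (k : Int), Dom_combinliste seq k → Spec_combinliste seq k (combinliste seq k)

-- ===== LEMMAS AND PROOFS =====

-- A's outer loop as a flatMap over the masks
theorem combinliste_flatMap (seq : List Int) (k : Int) :
    combinliste seq k =
      (List.range (2 ^ seq.length)).flatMap
        (fun i => if ((extractA seq i).length : Int) = k then [extractA seq i] else []) := by
  unfold combinliste
  rw [show (fun (p : List (List Int)) (i : Nat) =>
        let s := extractA seq i
        if ((s.length : Int) = k) then p ++ [s] else p)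
      = (fun p i => p ++ (if ((extractA seq i).length : Int) = k then [extractA seq i] else []))
    from by funext p i; by_cases h : ((extractA seq i).length : Int) = k <;> simp [h]]
  rw [PySem.List.foldl_append_eq_flatMap]
  simp

-- low masks ignore the appended element
theorem extractA_append_low (seq : List Int) (x : Int) (i : Nat) (hi : i < 2 ^ seq.length) :
    extractA (seq ++ [x]) i = extractA seq i := by
  unfold extractA
  rw [show (seq ++ [x]).length = seq.length + 1 by simp, List.range_succ, List.foldl_append]
  have hbit : (i >>> seq.length) &&& 1 = 0 := by
    rw [Nat.shiftRight_eq_div_pow, Nat.div_eq_of_lt hi]; rfl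
  simp only [List.foldl_cons, List.foldl_nil, hbit, if_neg (by decide : ¬ (0 : Nat) = 1)]
  exact PySem.List.foldl_congr_mem _ _ _ _
    (fun s j hj => by rw [List.getD_append _ _ _ _ (List.mem_range.mp hj)])

-- a low bit of 2^n + i (i < 2^n) agrees with the corresponding bit of i
theorem bit_high (n j i : Nat) (hj : j < n) (_hi : i < 2 ^ n) :
    ((2 ^ n + i) >>> j) &&& 1 = (i >>> j) &&& 1 := by
  have e : 2 ^ n = 2 ^ j * (2 * 2 ^ (n - j - 1)) := by
    rw [← pow_succ', ← pow_add]; congr 1; omega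
  rw [Nat.shiftRight_eq_div_pow, Nat.shiftRight_eq_div_pow, Nat.and_one_is_mod,
    Nat.and_one_is_mod, e, Nat.mul_add_div (Nat.two_pow_pos j), Nat.mul_add_mod]

-- high masks keep the low bits and add the appended element
theorem extractA_append_high (seq : List Int) (x : Int) (i : Nat) (hi : i < 2 ^ seq.length) :
    extractA (seq ++ [x]) (2 ^ seq.length + i) = extractA seq i ++ [x] := by
  unfold extractA
  rw [show (seq ++ [x]).length = seq.length + 1 by simp, List.range_succ, List.foldl_append]
  have hbit : ((2 ^ seq.length + i) >>> seq.length) &&& 1 = 1 := by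
    rw [Nat.shiftRight_eq_div_pow, Nat.add_div_left _ (Nat.two_pow_pos seq.length),
      Nat.div_eq_of_lt hi]
    decide
  simp only [List.foldl_cons, List.foldl_nil, hbit, if_true]
  congr 1
  · exact PySem.List.foldl_congr_mem _ _ _ _
      (fun s j hj => by
        have hjn := List.mem_range.mp hj
        rw [bit_high _ _ _ hjn hi, List.getD_append _ _ _ _ hjn])
  · rw [List.getD_append_right _ _ _ _ (le_refl _)]
    simp

theorem combinliste_append (seq : List Int) (x : Int) (k : Int) :
    combinliste (seq ++ [x]) k =
      combinliste seq k ++ (combinliste seq (k - 1)).map (fun c => c ++ [x]) := by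
  rw [combinliste_flatMap, combinliste_flatMap, combinliste_flatMap,
    show (seq ++ [x]).length = seq.length + 1 from by simp,
    show 2 ^ (seq.length + 1) = 2 ^ seq.length + 2 ^ seq.length from by ring,
    List.range_add, List.flatMap_append]
  congr 1
  · exact List.flatMap_congr (fun i hi => by
      rw [extractA_append_low seq x i (List.mem_range.mp hi)])
  · rw [List.flatMap_map, List.map_flatMap]
    apply List.flatMap_congr
    intro i hi
    rw [extractA_append_high seq x i (List.mem_range.mp hi)]
    by_cases h : ((extractA seq i).length : Int) = k - 1
    · rw [if_pos (show ((extractA seq i ++ [x]).length : Int) = k by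
        simp only [List.length_append, List.length_cons, List.length_nil]; push_cast; omega),
        if_pos h]
      simp
    · rw [if_neg (show ¬ ((extractA seq i ++ [x]).length : Int) = k by
        simp only [List.length_append, List.length_cons, List.length_nil]; push_cast; omega),
        if_neg h]
      simp

-- B's loop as a flatMap
theorem combAux_flatMap (seq : List Int) (m r : Nat) :
    combAux seq m (r + 1) =
      (List.range' r (m - r)).flatMap
        (fun j => (combAux seq j r).map (fun c => c ++ [seq.getD j 0])) := by
  show (List.range' r (m - r)).foldl _ [] = _
  rw [PySem.List.foldl_append_eq_flatMap]
  simp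

theorem combAux_congr (seq seq' : List Int) (r m : Nat)
    (h : ∀ j < m, seq.getD j 0 = seq'.getD j 0) :
    combAux seq m r = combAux seq' m r := by
  induction r generalizing m with
  | zero => rfl
  | succ r ih =>
    rw [combAux_flatMap, combAux_flatMap]
    apply List.flatMap_congr
    intro j hj
    obtain ⟨i, hi, rfl⟩ := List.mem_range'.mp hj
    have hjm : r + 1 * i < m := by omega
    rw [ih _ (fun j' hj' => h j' (by omega)), h _ hjm]

theorem combAux_succ (seq : List Int) (m r : Nat) :
    combAux seq (m + 1) (r + 1) =
      combAux seq m (r + 1) ++ (combAux seq m r).map (fun c => c ++ [seq.getD m 0]) := by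
  by_cases hrm : r ≤ m
  · rw [combAux_flatMap, combAux_flatMap,
      show m + 1 - r = (m - r) + 1 by omega, List.range'_concat,
      show r + 1 * (m - r) = m from by omega, List.flatMap_append]
    simp
  · have h1 : m + 1 - r = 0 := by omega
    have h2 : m - r = 0 := by omega
    obtain ⟨r', rfl⟩ : ∃ r', r = r' + 1 := ⟨r - 1, by omega⟩
    have h3 : combAux seq m (r' + 1) = [] := by
      rw [combAux_flatMap, show m - r' = 0 by omega]; simp
    rw [combAux_flatMap, combAux_flatMap, h1, h2, h3]
    simp

theorem main_eq (seq : List Int) : ∀ k : Int, combinliste seq k = combinliste_alt seq k := by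
  induction seq using List.reverseRecOn with
  | nil =>
    intro k
    have hA : combinliste [] k = if (0 : Int) = k then [[]] else [] := by
      rw [combinliste_flatMap]; simp [extractA]
    rw [hA]
    unfold combinliste_alt
    rcases lt_trichotomy k 0 with hk | hk | hk
    · rw [if_neg (show ¬ (0 : Int) = k by omega), if_pos hk]
    · subst hk; rfl
    · obtain ⟨r, hr⟩ : ∃ r : Nat, k.toNat = r + 1 := ⟨k.toNat - 1, by omega⟩
      rw [if_neg (show ¬ (0 : Int) = k by omega), if_neg (show ¬ k < 0 by omega), hr,
        combAux_flatMap]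
      simp
  | append_singleton seq x ih =>
    intro k
    rw [combinliste_append, ih, ih]
    unfold combinliste_alt
    rcases lt_trichotomy k 0 with hk | hk | hk
    · simp only [if_pos hk, if_pos (show k - 1 < 0 by omega)]; simp
    · subst hk
      simp only [if_neg (show ¬ (0 : Int) < 0 by omega),
        if_pos (show (0 : Int) - 1 < 0 by omega)]
      simp [combAux]
    · have h1 : ¬ k < 0 := by omega
      have h2 : ¬ k - 1 < 0 := by omega
      obtain ⟨r, hr⟩ : ∃ r : Nat, k.toNat = r + 1 := ⟨k.toNat - 1, by omega⟩
      have hr2 : (k - 1).toNat = r := by omega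
      have hgd : ∀ j < seq.length, (seq ++ [x]).getD j 0 = seq.getD j 0 :=
        fun j hj => List.getD_append _ _ _ _ hj
      simp only [if_neg h1, if_neg h2]
      rw [hr, hr2,
        show (seq ++ [x]).length = seq.length + 1 from by simp, combAux_succ,
        combAux_congr (seq ++ [x]) seq (r + 1) seq.length hgd,
        combAux_congr (seq ++ [x]) seq r seq.length hgd,
        List.getD_append_right _ _ _ _ (le_refl seq.length)]
      simp

-- ===== VERDICT (by name: the statement is the Claim_ definition above) =====
theorem combinliste_spec : Claim_equal_combinliste := by
  intro seq k _
  unfold Spec_combinliste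
  exact main_eq seq k
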